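-- pv_equiv track=rewrite | github.com/akifuji/nand2tetris | projects/08/code_writer.py | convert_function
-- ===== SOURCE A (Python) =====
-- def convert_function(args) -> str:
--     label = args[1]
--     local_n = int(args[2])
--     asm = ""
--     asm += "({})\n".format(label)
--     for _ in range(0, local_n):
--         asm += "@SP\n"
--         asm += "A=M\n"
--         asm += "M=0\n"
--         asm += "@SP\n"
--         asm += "M=M+1\n"
--     return asm
-- ===== SOURCE B (Python) =====
-- BLOCK = "@SP\nA=M\nM=0\n@SP\nM=M+1\n"
--
-- def convert_function(args) -> str:
--     label = args[1]
--     local_n = int(args[2])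
--     return "({})\n".format(label) + BLOCK * local_n
-- ===== Notes on version B (the rewrite author's own statement) =====
-- stated objective: simpler
-- what changed: Replaces the accumulate-in-a-loop construction with a closed-form expression: the constant per-local init block is built once and repeated by string multiplication, eliminating the loop and the 5 appends per iteration.
import Mathlib
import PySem

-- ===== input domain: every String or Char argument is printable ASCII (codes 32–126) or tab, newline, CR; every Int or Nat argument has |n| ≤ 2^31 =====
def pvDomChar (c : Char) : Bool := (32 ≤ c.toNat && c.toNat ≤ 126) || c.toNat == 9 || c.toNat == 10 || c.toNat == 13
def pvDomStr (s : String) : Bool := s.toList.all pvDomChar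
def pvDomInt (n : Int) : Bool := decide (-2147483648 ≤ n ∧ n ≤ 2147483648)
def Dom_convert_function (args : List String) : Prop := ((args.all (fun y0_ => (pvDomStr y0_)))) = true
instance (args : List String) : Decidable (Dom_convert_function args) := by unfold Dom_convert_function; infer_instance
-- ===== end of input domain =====

-- B replaces A's append-in-a-loop construction with a closed form: the constant
-- per-local block built once and repeated (string multiplication), no loop.
-- ===== PORT A =====
def convert_function (args : List String) : String :=
  match PySem.List.pyGet? args 1, PySem.List.pyGet? args 2 with
  | some label, some s2 =>
    match PySem.Int.ofStr? s2 with
    | some local_n =>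
      let asm := ""
      let asm := asm ++ ("(" ++ label ++ ")\n")
      let asm := (PySem.List.pyRange 0 local_n 1).foldl
        (fun asm _ => ((((asm ++ "@SP\n") ++ "A=M\n") ++ "M=0\n") ++ "@SP\n") ++ "M=M+1\n") asm
      asm
    | none => ""   -- int(args[2]) raises ValueError: excluded by Pre_
  | _, _ => ""     -- IndexError: excluded by Pre_

-- ===== PORT B =====
def pvBlock : String := "@SP\nA=M\nM=0\n@SP\nM=M+1\n"

-- hand port of Python's 'str * n' (exact: n ≤ 0 gives ""; Int.toNat is 0 for negatives)
def pyStrMul (s : String) : Nat → String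
  | 0 => ""
  | n + 1 => s ++ pyStrMul s n

def convert_function_alt (args : List String) : String :=
  match PySem.List.pyGet? args 1 with
  | none => ""       -- IndexError: excluded by Pre_
  | some label =>
    match (PySem.List.pyGet? args 2).bind PySem.Int.ofStr? with
    | none => ""     -- IndexError/ValueError: excluded by Pre_
    | some local_n => ("(" ++ label ++ ")\n") ++ pyStrMul pvBlock local_n.toNat

-- ===== PRECONDITION & SPEC =====
-- A raises IndexError when len(args) < 3 and ValueError when int(args[2]) fails; exactly those are excluded.
def Pre_convert_function (args : List String) : Prop :=
  3 ≤ args.length ∧ (PySem.Int.ofStr? (args.getD 2 "")).isSome = true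
instance (args : List String) : Decidable (Pre_convert_function args) := by
  unfold Pre_convert_function; infer_instance
def pvWitness_convert_function : List String := ["function", "Main.f", "2"]

def Spec_convert_function (args : List String) (out : String) : Prop := out = convert_function_alt args
instance (args : List String) (out : String) : Decidable (Spec_convert_function args out) := by unfold Spec_convert_function; infer_instance

-- ===== CLAIM (what is proved, stated in full; the proofs are below) =====
def Claim_equal_convert_function : Prop := ∀ (args : List String), Dom_convert_function args → Pre_convert_function args → Spec_convert_function args (convert_function args)

-- ===== LEMMAS AND PROOFS =====

theorem pyStrMul_snoc (s : String) (n : Nat) :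
    pyStrMul s n ++ s = pyStrMul s (n + 1) := by
  induction n with
  | zero => simp [pyStrMul]
  | succ m ihm =>
    simp only [pyStrMul, String.append_assoc]
    rw [ihm]
    simp [pyStrMul]

theorem foldl_block (L : Nat) (init : String) :
    (List.range L).foldl
      (fun asm _ => ((((asm ++ "@SP\n") ++ "A=M\n") ++ "M=0\n") ++ "@SP\n") ++ "M=M+1\n") init
    = init ++ pyStrMul pvBlock L := by
  induction L generalizing init with
  | zero => simp [pyStrMul]
  | succ n ih =>
    rw [List.range_succ, List.foldl_append, ih]
    simp only [List.foldl_cons, List.foldl_nil]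
    rw [← pyStrMul_snoc]
    simp [pvBlock, String.append_assoc]

-- ===== VERDICT (by name: the statement is the Claim_ definition above) =====
theorem convert_function_spec : Claim_equal_convert_function := by
  intro args hdom hpre
  obtain ⟨hlen, hint⟩ := hpre
  unfold Spec_convert_function convert_function convert_function_alt
  have h1 : PySem.List.pyGet? args 1 = some (args.getD 1 "") := by
    rw [show (1:Int) = ((1:Nat):Int) by norm_cast, PySem.List.pyGet?_natCast]
    simp [List.getD, List.getElem?_eq_getElem (show 1 < args.length by omega)]
  have h2 : PySem.List.pyGet? args 2 = some (args.getD 2 "") := by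
    rw [show (2:Int) = ((2:Nat):Int) by norm_cast, PySem.List.pyGet?_natCast]
    simp [List.getD, List.getElem?_eq_getElem (show 2 < args.length by omega)]
  obtain ⟨n, hn⟩ := Option.isSome_iff_exists.mp hint
  rw [h1, h2]
  simp only [hn, Option.bind_some]
  rw [PySem.List.pyRange_one, List.foldl_map]
  simp only [Int.sub_zero]
  rw [foldl_block]
  simp
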